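-- pv_equiv track=rewrite | github.com/daohanlu/mc-multiplayer-eval | handlers/camera_utils.py | find_end_of_first_sneak_chunk
-- ===== SOURCE A (Python) =====
-- from typing import List, Optional, Tuple
--
-- SNEAK_FRAME_START_DELAY = 25
--
-- def find_end_of_first_sneak_chunk(
--     data: List[dict],
--     buffer: int = SNEAK_FRAME_START_DELAY
-- ) -> Optional[int]:
--     """
--     Find the frame where the episode actually starts (after the first sneak chunk).
--
--     Episodes may have multiple sneak chunks, but we only want the end of the
--     first one, which marks when the episode actually begins. A buffer is added
--     to account for settling time after the sneak action completes.
--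
--     Args:
--         data: List of frame dictionaries containing action data
--         buffer: Number of frames to add after the sneak chunk ends (default: 25).
--                 Set to 0 to get the raw last frame of the sneak chunk.
--
--     Returns:
--         Index of the episode start frame (last sneak frame + buffer),
--         or None if no sneak frames found
--     """
--     in_sneak_chunk = False
--     last_sneak_in_chunk = None
--
--     for i, frame in enumerate(data):
--         is_sneaking = frame.get("action", {})["sneak"]
--
--         if is_sneaking:
--             in_sneak_chunk = True
--             last_sneak_in_chunk = i
--         elif in_sneak_chunk:
--             # We were in a sneak chunk but now sneak is False
--             # This means the first chunk has ended
--             break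
--
--     if last_sneak_in_chunk is None:
--         raise ValueError(f"No sneak frames found in data!")
--     return last_sneak_in_chunk + buffer
-- ===== SOURCE B (Python) =====
-- from itertools import groupby
--
-- SNEAK_FRAME_START_DELAY = 25
--
-- def find_end_of_first_sneak_chunk(data, buffer=SNEAK_FRAME_START_DELAY):
--     pos = 0
--     for key, group in groupby(data, key=lambda f: bool(f.get("action", {})["sneak"])):
--         n = sum(1 for _ in group)
--         if key:
--             return pos + n - 1 + buffer
--         pos += n
--     raise ValueError("No sneak frames found in data!")
-- ===== Notes on version B (the rewrite author's own statement) =====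
-- stated objective: alternative
-- what changed: Replaces A's per-frame loop with explicit in_sneak_chunk/last_sneak state by an itertools.groupby traversal over maximal same-truthiness runs: skip leading non-sneak groups and return the end index of the first True-keyed group plus buffer.
import Mathlib
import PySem

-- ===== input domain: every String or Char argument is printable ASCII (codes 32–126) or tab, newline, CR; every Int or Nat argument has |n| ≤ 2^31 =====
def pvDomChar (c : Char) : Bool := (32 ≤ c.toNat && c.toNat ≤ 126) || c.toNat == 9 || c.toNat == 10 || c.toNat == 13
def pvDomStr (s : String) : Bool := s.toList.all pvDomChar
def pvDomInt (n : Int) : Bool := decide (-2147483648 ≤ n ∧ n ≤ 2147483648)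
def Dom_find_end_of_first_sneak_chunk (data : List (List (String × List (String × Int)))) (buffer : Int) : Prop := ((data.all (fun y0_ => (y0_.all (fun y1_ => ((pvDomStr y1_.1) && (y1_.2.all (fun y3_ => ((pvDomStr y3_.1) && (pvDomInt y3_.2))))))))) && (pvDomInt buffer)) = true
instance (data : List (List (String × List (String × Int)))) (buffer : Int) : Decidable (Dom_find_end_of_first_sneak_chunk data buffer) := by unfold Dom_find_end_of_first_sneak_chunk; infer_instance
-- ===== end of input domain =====

-- B replaces A's explicit state-flag scan by a groupby-style traversal over maximal
-- same-truthiness runs (objective: alternative, same cost).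
-- Where the Python raises (KeyError on a missing "sneak" key among the examined frames,
-- ValueError when no sneak frame exists), both ports return the junk value 0; Pre_ excludes
-- exactly those inputs.

-- frame.get("action", {})["sneak"]  (none = KeyError, excluded by Pre_)
def sneakOf (frame : List (String × List (String × Int))) : Option Int :=
  (PySem.Dict.mk (((PySem.Dict.mk frame).get? "action").getD [])).get? "sneak"

-- ===== PORT A =====
-- the for-loop with the in_sneak_chunk flag, last_sneak_in_chunk accumulator and break
def sneakLoopA : List (List (String × List (String × Int))) → Nat → Bool → Option Nat → Option Nat
  | [], _, _, last => last
  | f :: rest, i, inChunk, last =>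
    let isSneaking : Bool := (sneakOf f).getD 0 != 0   -- truthiness of the int
    if isSneaking then sneakLoopA rest (i + 1) true (some i)
    else if inChunk then last                          -- break
    else sneakLoopA rest (i + 1) inChunk last

def find_end_of_first_sneak_chunk (data : List (List (String × List (String × Int)))) (buffer : Int) : Int :=
  match sneakLoopA data 0 false none with
  | none => 0                                          -- Python: raise ValueError (outside Pre_)
  | some e => (e : Int) + buffer

-- ===== PORT B =====
-- bool(frame.get("action", {})["sneak"])  — the groupby key
def sneakKey (frame : List (String × List (String × Int))) : Bool :=
  (sneakOf frame).getD 0 != 0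

-- the groupby loop: each step consumes one maximal same-key group
def groupLoopB (buffer : Int) : List (List (String × List (String × Int))) → Int → Option Int
  | [], _ => none                                      -- Python: raise ValueError (outside Pre_)
  | f :: rest, pos =>
    let k := sneakKey f
    let grp := rest.takeWhile (fun g => sneakKey g == k)
    let n : Int := 1 + grp.length                      -- n = sum(1 for _ in group)
    if k then some (pos + n - 1 + buffer)
    else groupLoopB buffer (rest.drop grp.length) (pos + n)
termination_by xs _ => xs.length
decreasing_by simp

def find_end_of_first_sneak_chunk_alt (data : List (List (String × List (String × Int)))) (buffer : Int) : Int :=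
  match groupLoopB buffer data 0 with
  | none => 0
  | some v => v

-- ===== PRECONDITION & SPEC =====
-- Pre_ holds exactly when the Python returns: there is a first maximal run of sneak-truthy
-- frames [s..e], every frame the loop examines (0..e, plus the boundary frame e+1 if any)
-- has its "sneak" key present, and the boundary frame (if any) is falsy.
def Pre_find_end_of_first_sneak_chunk (data : List (List (String × List (String × Int)))) (buffer : Int) : Prop :=
  ∃ s ∈ List.range data.length, ∃ e ∈ List.range data.length,
    s ≤ e ∧
    (∀ j ∈ List.range data.length,
      (j < s → sneakOf (data.getD j []) = some 0) ∧
      (s ≤ j → j ≤ e → (sneakOf (data.getD j [])).getD 0 ≠ 0)) ∧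
    (e + 1 = data.length ∨ sneakOf (data.getD (e + 1) []) = some 0)
instance (data : List (List (String × List (String × Int)))) (buffer : Int) : Decidable (Pre_find_end_of_first_sneak_chunk data buffer) := by unfold Pre_find_end_of_first_sneak_chunk; infer_instance

def pvWitness_find_end_of_first_sneak_chunk : (List (List (String × List (String × Int)))) × Int :=
  ([[("action", [("sneak", 0)])], [("action", [("sneak", 1)])], [("action", [("sneak", 0)])]], 25)

def Spec_find_end_of_first_sneak_chunk (data : List (List (String × List (String × Int)))) (buffer : Int) (out : Int) : Prop := out = find_end_of_first_sneak_chunk_alt data buffer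
instance (data : List (List (String × List (String × Int)))) (buffer : Int) (out : Int) : Decidable (Spec_find_end_of_first_sneak_chunk data buffer out) := by unfold Spec_find_end_of_first_sneak_chunk; infer_instance

-- ===== CLAIM (what is proved, stated in full; the proofs are below) =====
def Claim_equal_find_end_of_first_sneak_chunk : Prop := ∀ (data : List (List (String × List (String × Int)))) (buffer : Int), Dom_find_end_of_first_sneak_chunk data buffer → Pre_find_end_of_first_sneak_chunk data buffer → Spec_find_end_of_first_sneak_chunk data buffer (find_end_of_first_sneak_chunk data buffer)

-- ===== LEMMAS AND PROOFS =====

theorem takeWhile_key_true (xs : List (List (String × List (String × Int)))) :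
    xs.takeWhile (fun g => sneakKey g == true) = xs.takeWhile (fun g => sneakKey g) := by
  congr 1; funext g; simp

@[simp] theorem sneakKey_eq (f : List (String × List (String × Int))) :
    ((sneakOf f).getD 0 != 0) = sneakKey f := rfl

-- Once A's loop is inside a chunk with last = some j (entered at step j, so index j+1 next),
-- it returns j + (length of the leading truthy run).
theorem sneakLoopA_in_chunk (xs : List (List (String × List (String × Int)))) :
    ∀ j : Nat, sneakLoopA xs (j + 1) true (some j) =
      some (j + (xs.takeWhile (fun g => sneakKey g)).length) := by
  induction xs with
  | nil => intro j; simp [sneakLoopA]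
  | cons x xs ih =>
    intro j
    cases hx : sneakKey x with
    | true =>
      simp only [sneakLoopA, sneakKey_eq, hx, List.takeWhile_cons, ih (j + 1)]
      simp; omega
    | false =>
      simp [sneakLoopA, hx]

-- B's loop skips one leading falsy frame at a time: consuming the whole falsy group is the
-- same as consuming its head and restarting.
theorem groupLoopB_skip (buffer : Int) (f : List (String × List (String × Int)))
    (rest : List (List (String × List (String × Int)))) (pos : Int) (hf : sneakKey f = false) :
    groupLoopB buffer (f :: rest) pos = groupLoopB buffer rest (pos + 1) := by
  cases rest with
  | nil =>
    rw [groupLoopB.eq_def]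
    simp only [hf, Bool.false_eq_true, if_false, List.takeWhile_nil, List.drop_nil]
    rw [groupLoopB.eq_def]
    rw [groupLoopB.eq_def]
  | cons r rs =>
    cases hr : sneakKey r with
    | true =>
      conv_lhs => rw [groupLoopB.eq_def]
      conv_rhs => rw [groupLoopB.eq_def]
      simp only [hf, hr, List.takeWhile_cons, Bool.true_eq_false, beq_iff_eq, if_false,
        Bool.false_eq_true, List.length_nil, List.drop_zero, if_true]
      rw [groupLoopB.eq_def]
      simp [hr]
    | false =>
      conv_lhs => rw [groupLoopB.eq_def]
      conv_rhs => rw [groupLoopB.eq_def]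
      simp only [hf, hr, List.takeWhile_cons, beq_self_eq_true, if_true,
        Bool.false_eq_true, if_false, List.length_cons, List.drop_succ_cons]
      congr 1
      push_cast
      ring

-- The two loops agree (with the raise-case junk value 0 on both sides).
theorem loops_agree (buffer : Int) (xs : List (List (String × List (String × Int)))) :
    ∀ i : Nat,
      (match sneakLoopA xs i false none with
        | none => (0 : Int)
        | some e => (e : Int) + buffer) =
      (match groupLoopB buffer xs (i : Int) with
        | none => (0 : Int)
        | some v => v) := by
  induction xs with
  | nil => intro i; rw [groupLoopB.eq_def]; simp [sneakLoopA]
  | cons f rest ih =>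
    intro i
    cases h : sneakKey f with
    | true =>
      rw [groupLoopB.eq_def]
      simp only [sneakLoopA, sneakKey_eq, h, sneakLoopA_in_chunk rest i]
      simp only [takeWhile_key_true]
      push_cast
      ring_nf
    | false =>
      rw [groupLoopB_skip buffer f rest _ h]
      simp only [sneakLoopA, sneakKey_eq, h, Bool.false_eq_true, if_false]
      have := ih (i + 1)
      push_cast at this ⊢
      exact this

-- ===== VERDICT (by name: the statement is the Claim_ definition above) =====
theorem find_end_of_first_sneak_chunk_spec : Claim_equal_find_end_of_first_sneak_chunk := by
  intro data buffer _ _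
  show find_end_of_first_sneak_chunk data buffer = find_end_of_first_sneak_chunk_alt data buffer
  have := loops_agree buffer data 0
  simpa [find_end_of_first_sneak_chunk, find_end_of_first_sneak_chunk_alt] using this
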